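-- pv_equiv track=rewrite | github.com/lunivilen/dubna | ml_notebook/existing_algs.py | cluster_tracks
-- ===== SOURCE A (Python) =====
-- def common_hits(track1, track2):
--     hits1 = set(hit[0] for hit in track1)
--     hits2 = set(hit[0] for hit in track2)
--     return len(hits1.intersection(hits2))
--
-- def cluster_tracks(tracks, n):
--     # Собираем словарь с инфой, в каких треках встречается каждый хит
--     hit_to_tracks = {}
--     for track_index, track in enumerate(tracks):
--         for hit in track:
--             hit_index = hit[0]
--             if hit_index not in hit_to_tracks:
--                 hit_to_tracks[hit_index] = set()
--             hit_to_tracks[hit_index].add(track_index)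
--
--     # Кластеризация треков
--     clusters = []
--     used_tracks = set()
--     for i, track1 in enumerate(tracks):
--         if i in used_tracks:
--             continue
--
--         cluster = [i]
--         used_tracks.add(i)
--
--         for j, track2 in enumerate(tracks):
--             if j not in used_tracks and common_hits(track1, track2) >= n:
--                 cluster.append(j)
--                 used_tracks.add(j)
--
--         clusters.append(cluster)
--
--     return clusters
-- ===== SOURCE B (Python) =====
-- def cluster_tracks(tracks, n):
--     # distinct hit ids per track, in first-occurrence order
--     key_lists = [list(dict.fromkeys(hit[0] for hit in track)) for track in tracks]
--
--     # inverted index: hit id -> list of track indices containing it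
--     index = {}
--     for ti, keys in enumerate(key_lists):
--         for h in keys:
--             index.setdefault(h, []).append(ti)
--
--     # greedy partition of a shrinking (index, keys) worklist: the head is the
--     # seed; shared-hit counts against it come from the posting lists, and they
--     # split the tail into cluster members and the leftover worklist
--     clusters = []
--     remaining = list(enumerate(key_lists))
--     while remaining:
--         (i, keys), rest = remaining[0], remaining[1:]
--         counts = {}
--         for h in keys:
--             for t in index[h]:
--                 counts[t] = counts.get(t, 0) + 1
--         clusters.append([i] + [j for j, _ in rest if counts.get(j, 0) >= n])
--         remaining = [(j, ks) for j, ks in rest if counts.get(j, 0) < n]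
--     return clusters
-- ===== Notes on version B (the rewrite author's own statement) =====
-- stated objective: faster
-- what changed: B replaces A's used-set scan over all T^2 pairs with a greedy partition of a shrinking worklist: the head seeds a cluster, shared-hit counts against it come from the posting lists of a hit->tracks inverted index (which A builds but never reads), and they split the tail into cluster members and the leftover worklist.
import Mathlib
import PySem

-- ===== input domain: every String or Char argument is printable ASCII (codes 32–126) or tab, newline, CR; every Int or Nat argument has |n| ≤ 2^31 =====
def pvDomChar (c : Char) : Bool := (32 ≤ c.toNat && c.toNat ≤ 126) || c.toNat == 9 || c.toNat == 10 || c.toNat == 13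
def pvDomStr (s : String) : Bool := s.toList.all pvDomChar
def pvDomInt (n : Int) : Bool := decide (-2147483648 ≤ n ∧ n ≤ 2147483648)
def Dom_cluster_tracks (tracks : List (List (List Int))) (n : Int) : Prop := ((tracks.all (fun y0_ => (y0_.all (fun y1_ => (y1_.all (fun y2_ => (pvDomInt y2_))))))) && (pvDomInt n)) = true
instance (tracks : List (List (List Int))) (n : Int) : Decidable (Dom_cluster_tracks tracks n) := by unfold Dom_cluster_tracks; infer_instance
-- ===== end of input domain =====

-- B replaces A's used-set scan over all pairs by a greedy partition of a shrinking worklist,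
-- with shared-hit counts taken from the posting lists of the hit->tracks inverted index that
-- A builds but never reads; measured faster on large inputs.

-- ===== PORT A =====
-- hit[0]; exact under Pre_cluster_tracks (every hit list nonempty)
def pvHd0 (hit : List Int) : Int := PySem.List.pyGetD hit 0 0

def common_hits (track1 track2 : List (List Int)) : Int :=
  PySem.Set.len (PySem.Set.inter (PySem.Set.ofList (track1.map pvHd0)) (PySem.Set.ofList (track2.map pvHd0)))

-- the hit -> track-indices dictionary A builds (and never reads afterwards)
def pvA_index (tracks : List (List (List Int))) : PySem.Dict Int (PySem.Set Int) :=
  (PySem.List.enumerate tracks).foldl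
    (fun d p => p.2.foldl
      (fun d hit => d.modify (pvHd0 hit) PySem.Set.empty (fun s => PySem.Set.add s p.1)) d)
    PySem.Dict.empty

-- the inner 'for j, track2 in enumerate(tracks)' loop of A
def pvA_inner (tracks : List (List (List Int))) (n : Int) (track1 : List (List Int))
    (q0 : List Int × PySem.Set Int) : List Int × PySem.Set Int :=
  (PySem.List.enumerate tracks).foldl
    (fun q pj =>
      if ¬ PySem.Set.contains q.2 pj.1 = true ∧ common_hits track1 pj.2 ≥ n
      then (q.1 ++ [pj.1], PySem.Set.add q.2 pj.1) else q)
    q0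

def pvA_outerStep (tracks : List (List (List Int))) (n : Int)
    (st : List (List Int) × PySem.Set Int) (p : Int × List (List Int)) :
    List (List Int) × PySem.Set Int :=
  if PySem.Set.contains st.2 p.1 then st
  else
    let inner := pvA_inner tracks n p.2 ([p.1], PySem.Set.add st.2 p.1)
    (st.1 ++ [inner.1], inner.2)

def cluster_tracks (tracks : List (List (List Int))) (n : Int) : List (List Int) :=
  let _hit_to_tracks := pvA_index tracks
  ((PySem.List.enumerate tracks).foldl (pvA_outerStep tracks n) ([], PySem.Set.empty)).1

-- ===== PORT B =====
-- list(dict.fromkeys(hit[0] for hit in track))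
def pvKeys (track : List (List Int)) : List Int := PySem.List.dedup (track.map pvHd0)

-- inverted index: hit id -> list of track indices containing it
def pvB_index (key_lists : List (List Int)) : PySem.Dict Int (List Int) :=
  (PySem.List.enumerate key_lists).foldl
    (fun d p => p.2.foldl (fun d h => d.modify h [] (fun l => l ++ [p.1])) d)
    PySem.Dict.empty

-- shared-hit counts of every track against the seed, from the posting lists
def pvB_counts (index : PySem.Dict Int (List Int)) (keys : List Int) : PySem.Dict Int Int :=
  keys.foldl
    (fun c h => (index.getD h []).foldl (fun c t => c.modify t 0 (· + 1)) c)
    PySem.Dict.empty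

-- the 'while remaining:' loop: the head seeds a cluster, the counts split the tail
def pvB_go (index : PySem.Dict Int (List Int)) (n : Int) :
    List (Int × List Int) → List (List Int)
  | [] => []
  | p :: rest =>
    let counts := pvB_counts index p.2
    (p.1 :: (rest.filter (fun q => decide (counts.getD q.1 0 ≥ n))).map (·.1)) ::
      pvB_go index n (rest.filter (fun q => decide (counts.getD q.1 0 < n)))
termination_by l => l.length
decreasing_by
  simp only [List.length_cons, List.length_unattach]
  exact Nat.lt_succ_of_le (le_trans (List.length_filter_le _ _) (by simp))

def cluster_tracks_alt (tracks : List (List (List Int))) (n : Int) : List (List Int) :=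
  let key_lists := tracks.map pvKeys
  pvB_go (pvB_index key_lists) n (PySem.List.enumerate key_lists)

-- ===== PRECONDITION & SPEC =====
-- Pre_ excludes inputs containing an empty hit list, on which A (and B) raise IndexError at hit[0].
def Pre_cluster_tracks (tracks : List (List (List Int))) (n : Int) : Prop :=
  ∀ t ∈ tracks, ∀ h ∈ t, h ≠ []
instance (tracks : List (List (List Int))) (n : Int) : Decidable (Pre_cluster_tracks tracks n) := by unfold Pre_cluster_tracks; infer_instance
def pvWitness_cluster_tracks : List (List (List Int)) × Int := ([[[1], [2]], [[1], [3]], [[4]]], 1)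

def Spec_cluster_tracks (tracks : List (List (List Int))) (n : Int) (out : List (List Int)) : Prop := out = cluster_tracks_alt tracks n
instance (tracks : List (List (List Int))) (n : Int) (out : List (List Int)) : Decidable (Spec_cluster_tracks tracks n out) := by unfold Spec_cluster_tracks; infer_instance

-- ===== CLAIM (what is proved, stated in full; the proofs are below) =====
def Claim_equal_cluster_tracks : Prop := ∀ (tracks : List (List (List Int))) (n : Int), Dom_cluster_tracks tracks n → Pre_cluster_tracks tracks n → Spec_cluster_tracks tracks n (cluster_tracks tracks n)

-- ===== LEMMAS AND PROOFS =====

-- reference greedy partition both ports are reduced to (proof helper only)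
def pvGoSpec (n : Int) : List (Int × List (List Int)) → List (List Int)
  | [] => []
  | p :: rest =>
    (p.1 :: (rest.filter (fun q => decide (common_hits p.2 q.2 ≥ n))).map (·.1)) ::
      pvGoSpec n (rest.filter (fun q => decide (common_hits p.2 q.2 < n)))
termination_by l => l.length
decreasing_by
  simp only [List.length_cons, List.length_unattach]
  exact Nat.lt_succ_of_le (le_trans (List.length_filter_le _ _) (by simp))

theorem pv_enumerate_map {α β : Type} (f : α → β) (xs : List α) (s : Int) :
    PySem.List.enumerate (xs.map f) s = (PySem.List.enumerate xs s).map (fun p => (p.1, f p.2)) := by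
  induction xs generalizing s with
  | nil => simp [PySem.List.enumerate_nil]
  | cons x t ih => simp [PySem.List.enumerate_cons, ih]

theorem pv_common_countP (t1 t2 : List (List Int)) :
    common_hits t1 t2 = ((pvKeys t1).countP (fun h => (pvKeys t2).contains h) : Int) := by
  simp [common_hits, pvKeys, PySem.Set.inter, PySem.Set.len, PySem.List.dedup_eq_ofList,
    ← List.countP_eq_length_filter]

theorem pv_sum_indicator (K : List Int) (p : Int → Bool) :
    (K.map (fun h => if p h then (1 : Int) else 0)).sum = (K.countP p : Int) := by
  induction K with
  | nil => simp
  | cons x t ih => by_cases hx : p x <;> simp [hx, ih, add_comm]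

theorem pv_flatMap_if {α β : Type} (l : List α) (c : α → Bool) (f : α → β) :
    l.flatMap (fun x => if c x then [f x] else []) = (l.filter c).map f := by
  induction l with
  | nil => simp
  | cons x t ih => by_cases hx : c x <;> simp [hx, ih]

theorem pv_filter_beq_nodup (l : List Int) (hnd : l.Nodup) (h : Int) :
    l.filter (fun x => x == h) = if l.contains h then [h] else [] := by
  rw [List.filter_beq]
  by_cases hm : h ∈ l
  · simp [hm, List.count_eq_one_of_mem hnd hm]
  · simp [hm, List.count_eq_zero.mpr hm]

theorem pv_index_getD' (key_lists : List (List Int)) (hnd : ∀ ks ∈ key_lists, ks.Nodup) (h : Int) :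
    (pvB_index key_lists).getD h [] =
      ((PySem.List.enumerate key_lists).filter (fun p => p.2.contains h)).map (·.1) := by
  have hfold : pvB_index key_lists =
      ((PySem.List.enumerate key_lists).flatMap (fun p => p.2.map (fun x => (x, p.1)))).foldl
        (fun d q => d.modify q.1 [] (fun l => l ++ [q.2])) PySem.Dict.empty := by
    rw [List.foldl_flatMap]
    unfold pvB_index
    apply PySem.List.foldl_congr_mem
    intro acc p _
    rw [List.foldl_map]
  rw [hfold, PySem.Dict.getD_foldl_modify_append]
  rw [List.filter_flatMap]
  have hstep : ∀ p ∈ PySem.List.enumerate key_lists,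
      ((p.2.map (fun x => (x, p.1))).filter (fun q => q.1 == h)) =
        if p.2.contains h then [(h, p.1)] else [] := by
    intro p hp
    rw [List.filter_map]
    have hnd2 : p.2.Nodup := by
      rcases (PySem.List.mem_enumerate_iff _ _ _).1 hp with ⟨k, hk, rfl⟩
      exact hnd _ (List.getElem_mem hk)
    have : (fun q => q.1 == h) ∘ (fun x => (x, p.1)) = fun x => x == h := rfl
    rw [this, pv_filter_beq_nodup p.2 hnd2 h]
    by_cases hm : h ∈ p.2 <;> simp [hm]
  rw [List.flatMap_congr hstep, List.map_flatMap]
  have h2 : (fun p : Int × List Int =>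
      List.map (fun q : Int × Int => q.2) (if p.2.contains h then [(h, p.1)] else [])) =
      fun p => if p.2.contains h then [p.1] else [] := by
    funext p; by_cases hm : h ∈ p.2 <;> simp [hm]
  rw [h2]
  exact pv_flatMap_if _ _ _

theorem pv_posting_nodup (key_lists : List (List Int)) (c : Int × List Int → Bool) :
    (((PySem.List.enumerate key_lists).filter c).map (·.1)).Nodup := by
  have hp : ((PySem.List.enumerate key_lists).filter c).Pairwise (fun p q => p.1 < q.1) :=
    (PySem.List.pairwise_lt_enumerate key_lists 0).filter c
  have : (((PySem.List.enumerate key_lists).filter c).map (·.1)).Pairwise (· < ·) := by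
    rw [List.pairwise_map]; exact hp
  unfold List.Nodup
  exact this.imp (fun hlt => ne_of_lt hlt)

theorem pv_posting_mem (key_lists : List (List Int)) (h j : Int) :
    (j ∈ (((PySem.List.enumerate key_lists).filter (fun p => p.2.contains h)).map (·.1))) ↔
      ∃ (k : Nat) (hk : k < key_lists.length), j = (k : Int) ∧ h ∈ key_lists[k] := by
  simp only [List.mem_map, List.mem_filter]
  constructor
  · rintro ⟨p, ⟨hp, hc⟩, rfl⟩
    rcases (PySem.List.mem_enumerate_iff _ _ _).1 hp with ⟨k, hk, rfl⟩
    exact ⟨k, hk, by simp, by simpa using hc⟩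
  · rintro ⟨k, hk, rfl, hm⟩
    refine ⟨((k : Int), key_lists[k]), ⟨?_, by simpa using hm⟩, rfl⟩
    exact (PySem.List.mem_enumerate_iff _ _ _).2 ⟨k, hk, by simp⟩

theorem pv_posting_count' (key_lists : List (List Int)) (hnd : ∀ ks ∈ key_lists, ks.Nodup)
    (h j : Int) :
    ((pvB_index key_lists).getD h []).count j =
      if hj : 0 ≤ j ∧ j.toNat < key_lists.length then
        (if h ∈ key_lists[j.toNat] then 1 else 0) else 0 := by
  rw [pv_index_getD' key_lists hnd h]
  by_cases hmem : j ∈ (((PySem.List.enumerate key_lists).filter (fun p => p.2.contains h)).map (·.1))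
  · rcases (pv_posting_mem key_lists h j).1 hmem with ⟨k, hk, rfl, hm⟩
    rw [List.count_eq_one_of_mem (pv_posting_nodup _ _) hmem]
    simp [hk, hm]
  · rw [List.count_eq_zero.mpr hmem]
    rw [pv_posting_mem] at hmem
    split_ifs with h1 h2
    · exact absurd ⟨j.toNat, h1.2, by omega, h2⟩ hmem
    · rfl
    · rfl

theorem pv_counts_getD_gen (index : PySem.Dict Int (List Int)) (j : Int) (K : List Int)
    (c : PySem.Dict Int Int) :
    (K.foldl (fun c h => (index.getD h []).foldl (fun c t => c.modify t 0 (· + 1)) c) c).getD j 0 =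
      c.getD j 0 + (K.map (fun h => (((index.getD h []).count j : Nat) : Int))).sum := by
  induction K generalizing c with
  | nil => simp
  | cons x t ih =>
    simp only [List.foldl_cons, List.map_cons, List.sum_cons]
    rw [ih, PySem.Dict.getD_foldl_modify_add_one]
    ring

theorem pv_counts_getD' (index : PySem.Dict Int (List Int)) (K : List Int) (j : Int) :
    (pvB_counts index K).getD j 0 =
      (K.map (fun h => (((index.getD h []).count j : Nat) : Int))).sum := by
  unfold pvB_counts
  rw [pv_counts_getD_gen]
  simp

theorem pv_counts_eq_common (tracks : List (List (List Int))) (t : List (List Int)) (j : Int)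
    (h0 : 0 ≤ j) (hj : j.toNat < tracks.length) :
    (pvB_counts (pvB_index (tracks.map pvKeys)) (pvKeys t)).getD j 0 =
      common_hits t (tracks[j.toNat]'hj) := by
  have hnd : ∀ ks ∈ tracks.map pvKeys, ks.Nodup := by
    intro ks hks
    rcases List.mem_map.1 hks with ⟨tr, _, rfl⟩
    exact PySem.List.nodup_dedup _
  rw [pv_counts_getD', pv_common_countP]
  have hcnt : ∀ h : Int,
      ((pvB_index (tracks.map pvKeys)).getD h []).count j =
        if (pvKeys (tracks[j.toNat]'hj)).contains h then 1 else 0 := by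
    intro h
    rw [pv_posting_count' _ hnd h j]
    have hj' : 0 ≤ j ∧ j.toNat < (tracks.map pvKeys).length := by simp [h0, hj]
    rw [dif_pos hj']
    have : (tracks.map pvKeys)[j.toNat]'(by simpa using hj) = pvKeys (tracks[j.toNat]'hj) :=
      List.getElem_map pvKeys
    rw [this]
    by_cases hm : h ∈ pvKeys (tracks[j.toNat]'hj) <;> simp [hm]
  have : (pvKeys t).map (fun h => (((pvB_index (tracks.map pvKeys)).getD h []).count j : Int)) =
      (pvKeys t).map (fun h => if (pvKeys (tracks[j.toNat]'hj)).contains h then (1 : Int) else 0) := by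
    apply List.map_congr_left
    intro h _
    rw [hcnt h]
    split_ifs <;> simp
  rw [this, pv_sum_indicator]

-- Boolean characterisations of Set.contains
theorem pv_contains_mem (u : PySem.Set Int) (x : Int) :
    PySem.Set.contains u x = decide (x ∈ u) := by
  rw [Bool.eq_iff_iff]
  simp [PySem.Set.contains_iff]

theorem pv_contains_add (u : PySem.Set Int) (a x : Int) :
    PySem.Set.contains (PySem.Set.add u a) x = (PySem.Set.contains u x || decide (x = a)) := by
  rw [Bool.eq_iff_iff]
  simp [PySem.Set.contains_iff, PySem.Set.mem_add]

-- membership through the used-set accumulation of A's inner loop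
theorem pv_addAll_mem {α : Type} (M : List (Int × α)) (u : PySem.Set Int) (x : Int) :
    (x ∈ M.foldl (fun u p => PySem.Set.add u p.1) u) ↔ x ∈ u ∨ x ∈ M.map (·.1) := by
  induction M generalizing u with
  | nil => simp
  | cons p M ih =>
    simp only [List.foldl_cons, List.map_cons, List.mem_cons]
    rw [ih, PySem.Set.mem_add]
    tauto

-- A's inner loop, characterised as one filter over its scan list
theorem pv_innerFold (t : List (List Int)) (n : Int) :
    ∀ (l : List (Int × List (List Int))) (acc : List Int) (u : PySem.Set Int),
    l.Pairwise (fun p q => p.1 ≠ q.1) →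
    l.foldl
      (fun q pj =>
        if ¬ PySem.Set.contains q.2 pj.1 = true ∧ common_hits t pj.2 ≥ n
        then (q.1 ++ [pj.1], PySem.Set.add q.2 pj.1) else q)
      (acc, u)
    = (acc ++ (l.filter (fun p => !PySem.Set.contains u p.1 && decide (common_hits t p.2 ≥ n))).map (·.1),
       (l.filter (fun p => !PySem.Set.contains u p.1 && decide (common_hits t p.2 ≥ n))).foldl
         (fun u p => PySem.Set.add u p.1) u) := by
  intro l
  induction l with
  | nil => intro acc u _; simp
  | cons p l ih =>
    intro acc u hpw
    have hhd : ∀ q ∈ l, p.1 ≠ q.1 := fun q hq => List.rel_of_pairwise_cons hpw hq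
    have htl : l.Pairwise (fun p q => p.1 ≠ q.1) := hpw.of_cons
    have hcong : l.filter (fun q => !PySem.Set.contains (PySem.Set.add u p.1) q.1 && decide (common_hits t q.2 ≥ n))
        = l.filter (fun q => !PySem.Set.contains u q.1 && decide (common_hits t q.2 ≥ n)) := by
      apply List.filter_congr
      intro q hq
      rw [pv_contains_add]
      have hne : decide (q.1 = p.1) = false := by
        simp only [decide_eq_false_iff_not]
        exact fun h => hhd q hq h.symm
      rw [hne, Bool.or_false]
    by_cases hc : ¬ PySem.Set.contains u p.1 = true ∧ common_hits t p.2 ≥ n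
    · have h1 : PySem.Set.contains u p.1 = false := Bool.eq_false_iff.2 hc.1
      have hnm : p.1 ∉ u := fun hm => hc.1 ((PySem.Set.contains_iff u p.1).2 hm)
      have hb : (!PySem.Set.contains u p.1 && decide (common_hits t p.2 ≥ n)) = true := by
        simp [hnm, hc.2]
      have hfc : (p :: l).filter (fun q => !PySem.Set.contains u q.1 && decide (common_hits t q.2 ≥ n))
          = p :: l.filter (fun q => !PySem.Set.contains u q.1 && decide (common_hits t q.2 ≥ n)) := by
        simp [List.filter_cons, hnm, hc.2]
      rw [List.foldl_cons, if_pos hc, hfc]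
      have hred : (((acc, u).1 ++ [p.1], PySem.Set.add (acc, u).2 p.1) : List Int × PySem.Set Int)
          = (acc ++ [p.1], PySem.Set.add u p.1) := rfl
      rw [hred, ih (acc ++ [p.1]) (PySem.Set.add u p.1) htl, hcong]
      simp
    · have himp : p.1 ∉ u → common_hits t p.2 < n := by
        intro hnm
        rcases not_and_or.1 hc with h | h
        · exact absurd ((PySem.Set.contains_iff u p.1).1 (not_not.1 h)) hnm
        · exact lt_of_not_ge h
      have hfc : (p :: l).filter (fun q => !PySem.Set.contains u q.1 && decide (common_hits t q.2 ≥ n))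
          = l.filter (fun q => !PySem.Set.contains u q.1 && decide (common_hits t q.2 ≥ n)) := by
        by_cases hm : p.1 ∈ u
        · simp [List.filter_cons, hm]
        · simp [List.filter_cons, hm, not_le.2 (himp hm)]
      rw [List.foldl_cons, if_neg hc, hfc]
      exact ih acc u htl

-- A's outer loop equals the greedy partition of the not-yet-used suffix
theorem pv_outerFold (tracks : List (List (List Int))) (n : Int) :
    ∀ (l pre : List (Int × List (List Int))) (acc : List (List Int)) (u : PySem.Set Int),
    PySem.List.enumerate tracks = pre ++ l →
    (∀ p ∈ pre, PySem.Set.contains u p.1 = true) →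
    (l.foldl (pvA_outerStep tracks n) (acc, u)).1
      = acc ++ pvGoSpec n (l.filter (fun p => !PySem.Set.contains u p.1)) := by
  intro l
  induction l with
  | nil => intro pre acc u _ _; simp [pvGoSpec]
  | cons p l ih =>
    intro pre acc u hE hpre
    have hpwE : (PySem.List.enumerate tracks).Pairwise (fun a b : Int × List (List Int) => a.1 ≠ b.1) :=
      (PySem.List.pairwise_lt_enumerate tracks 0).imp (fun h => ne_of_lt h)
    have hpw : (pre ++ p :: l).Pairwise (fun a b : Int × List (List Int) => a.1 ≠ b.1) := by
      rw [← hE]; exact hpwE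
    have hpl : (p :: l).Pairwise (fun a b : Int × List (List Int) => a.1 ≠ b.1) :=
      (List.pairwise_append.1 hpw).2.1
    have hhd : ∀ q ∈ l, p.1 ≠ q.1 := fun q hq => List.rel_of_pairwise_cons hpl hq
    have htl : l.Pairwise (fun a b : Int × List (List Int) => a.1 ≠ b.1) := hpl.of_cons
    by_cases hcu : PySem.Set.contains u p.1 = true
    · -- 'if i in used_tracks: continue'
      have hstep : pvA_outerStep tracks n (acc, u) p = (acc, u) := by
        unfold pvA_outerStep; rw [if_pos hcu]
      rw [List.foldl_cons, hstep,
        List.filter_cons_of_neg (by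
          have hm : p.1 ∈ u := (PySem.Set.contains_iff u p.1).1 hcu
          simp [hm])]
      exact ih (pre ++ [p]) acc u (by rw [hE, List.append_assoc]; rfl)
        (by intro q hq
            rcases List.mem_append.1 hq with h | h
            · exact hpre q h
            · simp at h; rw [h]; exact hcu)
    · -- seed case
      have hcuf : PySem.Set.contains u p.1 = false := Bool.eq_false_iff.2 hcu
      have hinner := pv_innerFold p.2 n (PySem.List.enumerate tracks) [p.1] (PySem.Set.add u p.1) hpwE
      set c1 : Int × List (List Int) → Bool :=
        fun q => !PySem.Set.contains (PySem.Set.add u p.1) q.1 && decide (common_hits p.2 q.2 ≥ n) with hc1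
      have hMpre : pre.filter c1 = [] := by
        apply List.filter_eq_nil_iff.2
        intro q hq
        have hm : q.1 ∈ u := (PySem.Set.contains_iff u q.1).1 (hpre q hq)
        simp [hc1, pv_contains_add, hm]
      have hMp : c1 p = false := by
        simp [hc1, pv_contains_add]
      have hM : (PySem.List.enumerate tracks).filter c1 =
          l.filter (fun q => !PySem.Set.contains u q.1 && decide (common_hits p.2 q.2 ≥ n)) := by
        rw [hE, List.filter_append, hMpre, List.filter_cons_of_neg (by simp [hMp])]
        rw [List.nil_append]
        apply List.filter_congr
        intro q hq
        simp only [hc1, pv_contains_add]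
        have hne : decide (q.1 = p.1) = false := by
          simp only [decide_eq_false_iff_not]
          exact fun h => hhd q hq h.symm
        rw [hne, Bool.or_false]
      set M := l.filter (fun q => !PySem.Set.contains u q.1 && decide (common_hits p.2 q.2 ≥ n)) with hMdef
      set u' := M.foldl (fun u q => PySem.Set.add u q.1) (PySem.Set.add u p.1) with hu'
      set rem := l.filter (fun q => !PySem.Set.contains u q.1) with hrem
      have hinner' : pvA_inner tracks n p.2 ([p.1], PySem.Set.add u p.1) =
          ([p.1] ++ M.map (·.1), u') := by
        unfold pvA_inner
        rw [hinner, hM]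
      have hstep : pvA_outerStep tracks n (acc, u) p = (acc ++ [p.1 :: M.map (·.1)], u') := by
        unfold pvA_outerStep
        rw [if_neg hcu]
        show ((acc, u).1 ++ [(pvA_inner tracks n p.2 ([p.1], PySem.Set.add (acc, u).2 p.1)).1],
          (pvA_inner tracks n p.2 ([p.1], PySem.Set.add (acc, u).2 p.1)).2) = _
        rw [hinner']
        rfl
      have hndfst : (l.map (fun q : Int × List (List Int) => q.1)).Nodup :=
        List.pairwise_map.mpr htl
      have hu'mem : ∀ q ∈ l, (PySem.Set.contains u' q.1 = true ↔
          q.1 ∈ u ∨ (¬ q.1 ∈ u ∧ common_hits p.2 q.2 ≥ n)) := by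
        intro q hq
        rw [PySem.Set.contains_iff, hu', pv_addAll_mem, PySem.Set.mem_add]
        constructor
        · rintro ((h | h) | h)
          · exact Or.inl h
          · exact absurd h.symm (hhd q hq)
          · rcases List.mem_map.1 h with ⟨r, hrM, hr1⟩
            have hrl : r ∈ l := List.mem_of_mem_filter hrM
            have hrq : r = q := List.inj_on_of_nodup_map hndfst hrl hq hr1
            have hpred := List.of_mem_filter hrM
            rw [hrq] at hpred
            simp only [Bool.and_eq_true, Bool.not_eq_true', decide_eq_true_eq] at hpred
            refine Or.inr ⟨fun hm => ?_, hpred.2⟩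
            have hx := (PySem.Set.contains_iff u q.1).2 hm
            rw [hpred.1] at hx
            exact absurd hx (by simp)
        · rintro (h | ⟨hnu, hge⟩)
          · exact Or.inl (Or.inl h)
          · refine Or.inr (List.mem_map.2 ⟨q, ?_, rfl⟩)
            rw [hMdef, List.mem_filter]
            refine ⟨hq, ?_⟩
            have hf : PySem.Set.contains u q.1 = false := by
              rw [Bool.eq_false_iff]
              intro hx
              exact hnu ((PySem.Set.contains_iff _ _).1 hx)
            simp [hf, hge, hnu]
      -- the tail's leftover worklist
      have hleft : l.filter (fun q => !PySem.Set.contains u' q.1) =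
          rem.filter (fun q => decide (common_hits p.2 q.2 < n)) := by
        rw [hrem, List.filter_filter]
        apply List.filter_congr
        intro q hq
        have hiff := hu'mem q hq
        by_cases hm : q.1 ∈ u
        · have h1 : PySem.Set.contains u' q.1 = true := hiff.2 (Or.inl hm)
          have h2 : PySem.Set.contains u q.1 = true := (PySem.Set.contains_iff _ _).2 hm
          rw [h1, h2]
          simp
        · have h2 : PySem.Set.contains u q.1 = false := by
            rw [Bool.eq_false_iff]; intro hx; exact hm ((PySem.Set.contains_iff _ _).1 hx)
          by_cases hge : common_hits p.2 q.2 ≥ n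
          · have h1 : PySem.Set.contains u' q.1 = true := hiff.2 (Or.inr ⟨hm, hge⟩)
            have hnl : ¬ common_hits p.2 q.2 < n := not_lt.2 hge
            rw [h1, h2]
            simp [hnl]
          · have h1 : PySem.Set.contains u' q.1 = false := by
              rw [Bool.eq_false_iff]
              intro hx
              rcases hiff.1 hx with h | h
              · exact hm h
              · exact hge h.2
            have hlt : common_hits p.2 q.2 < n := lt_of_not_ge hge
            rw [h1, h2]
            simp [hlt]
      -- the seed's cluster
      have hclus : M = rem.filter (fun q => decide (common_hits p.2 q.2 ≥ n)) := by
        rw [hrem, List.filter_filter, hMdef]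
        exact List.filter_congr (fun q hq => Bool.and_comm _ _)
      -- assemble
      rw [List.foldl_cons, hstep]
      rw [ih (pre ++ [p]) (acc ++ [p.1 :: M.map (·.1)]) u'
        (by rw [hE, List.append_assoc]; rfl)
        (by intro q hq
            rcases List.mem_append.1 hq with h | h
            · rw [pv_contains_mem, decide_eq_true_iff]
              rw [hu', pv_addAll_mem, PySem.Set.mem_add]
              exact Or.inl (Or.inl ((PySem.Set.contains_iff _ _).1 (hpre q h)))
            · simp at h
              rw [h, pv_contains_mem, decide_eq_true_iff, hu', pv_addAll_mem, PySem.Set.mem_add]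
              exact Or.inl (Or.inr rfl))]
      rw [hleft]
      have hfilcons : (p :: l).filter (fun q => !PySem.Set.contains u q.1) = p :: rem := by
        rw [List.filter_cons_of_pos (by simp only [hcuf, Bool.not_false])]
      rw [hfilcons]
      have hgo : pvGoSpec n (p :: rem) =
          (p.1 :: (rem.filter (fun q => decide (common_hits p.2 q.2 ≥ n))).map (·.1)) ::
            pvGoSpec n (rem.filter (fun q => decide (common_hits p.2 q.2 < n))) := by
        simp [pvGoSpec]
      rw [hgo, ← hclus]
      simp

-- B's worklist recursion equals the same greedy partition
theorem pv_go_eq (tracks : List (List (List Int))) (n : Int) :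
    ∀ (m : Nat) (l : List (Int × List (List Int))), l.length ≤ m →
    (∀ q ∈ l, ∃ (k : Nat) (hk : k < tracks.length), q.1 = (k : Int) ∧ q.2 = tracks[k]) →
    pvB_go (pvB_index (tracks.map pvKeys)) n (l.map (fun p => (p.1, pvKeys p.2))) = pvGoSpec n l := by
  intro m
  induction m with
  | zero =>
    intro l hl _
    have : l = [] := List.length_eq_zero_iff.1 (Nat.le_zero.1 hl)
    subst this
    simp [pvB_go, pvGoSpec]
  | succ m ih =>
    intro l hl hinv
    cases l with
    | nil => simp [pvB_go, pvGoSpec]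
    | cons p l =>
      have hlen : l.length ≤ m := by simp at hl; omega
      have hcnt : ∀ q ∈ l,
          (pvB_counts (pvB_index (tracks.map pvKeys)) (pvKeys p.2)).getD q.1 0 =
            common_hits p.2 q.2 := by
        intro q hq
        rcases hinv q (by simp [hq]) with ⟨k, hk, h1, h2⟩
        rw [h1, h2]
        have := pv_counts_eq_common tracks p.2 (k : Int) (by positivity) (by simpa using hk)
        simpa using this
      simp only [List.map_cons, pvB_go]
      rw [List.filter_map, List.filter_map, List.map_map]
      have hge : l.filter ((fun q : Int × List Int =>
            decide ((pvB_counts (pvB_index (tracks.map pvKeys)) (pvKeys p.2)).getD q.1 0 ≥ n)) ∘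
              (fun p => (p.1, pvKeys p.2))) =
          l.filter (fun q => decide (common_hits p.2 q.2 ≥ n)) := by
        apply List.filter_congr
        intro q hq
        show decide ((pvB_counts (pvB_index (tracks.map pvKeys)) (pvKeys p.2)).getD q.1 0 ≥ n) = _
        rw [hcnt q hq]
      have hlt : l.filter ((fun q : Int × List Int =>
            decide ((pvB_counts (pvB_index (tracks.map pvKeys)) (pvKeys p.2)).getD q.1 0 < n)) ∘
              (fun p => (p.1, pvKeys p.2))) =
          l.filter (fun q => decide (common_hits p.2 q.2 < n)) := by
        apply List.filter_congr
        intro q hq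
        show decide ((pvB_counts (pvB_index (tracks.map pvKeys)) (pvKeys p.2)).getD q.1 0 < n) = _
        rw [hcnt q hq]
      rw [hge, hlt]
      rw [ih (l.filter (fun q => decide (common_hits p.2 q.2 < n)))
        (le_trans (List.length_filter_le _ _) hlen)
        (fun q hq => hinv q (by simp [List.mem_of_mem_filter hq]))]
      have hgo : pvGoSpec n (p :: l) =
          (p.1 :: (l.filter (fun q => decide (common_hits p.2 q.2 ≥ n))).map (·.1)) ::
            pvGoSpec n (l.filter (fun q => decide (common_hits p.2 q.2 < n))) := by
        simp [pvGoSpec]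
      rw [hgo]
      rfl

-- ===== VERDICT (by name: the statement is the Claim_ definition above) =====
theorem cluster_tracks_spec : Claim_equal_cluster_tracks := by
  intro tracks n _ _
  unfold Spec_cluster_tracks
  have hA : cluster_tracks tracks n = pvGoSpec n (PySem.List.enumerate tracks) := by
    show ((PySem.List.enumerate tracks).foldl (pvA_outerStep tracks n) ([], PySem.Set.empty)).1 = _
    rw [pv_outerFold tracks n (PySem.List.enumerate tracks) [] [] PySem.Set.empty
      (by simp) (by intro p hp; simp at hp)]
    have hfil : (PySem.List.enumerate tracks).filter
        (fun p => !PySem.Set.contains (PySem.Set.empty : PySem.Set Int) p.1) =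
        PySem.List.enumerate tracks := by
      apply List.filter_eq_self.2
      intro p _
      simp [pv_contains_mem, PySem.Set.empty]
    rw [hfil, List.nil_append]
  have hB : cluster_tracks_alt tracks n = pvGoSpec n (PySem.List.enumerate tracks) := by
    show pvB_go (pvB_index (tracks.map pvKeys)) n (PySem.List.enumerate (tracks.map pvKeys)) = _
    rw [pv_enumerate_map]
    exact pv_go_eq tracks n (PySem.List.enumerate tracks).length (PySem.List.enumerate tracks) le_rfl
      (by intro q hq
          rcases (PySem.List.mem_enumerate_iff _ _ _).1 hq with ⟨k, hk, rfl⟩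
          exact ⟨k, hk, by simp, by simp⟩)
  rw [hA, hB]
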